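-- pv_equiv track=rewrite | github.com/OMCHOKSI108/FastAPI-Stock-data- | app/fetcher.py | is_crypto_symbol
-- ===== SOURCE A (Python) =====
-- def is_crypto_symbol(symbol: str) -> bool:
--     """
--     Determine if a symbol is a cryptocurrency based on common patterns.
--     """
--     symbol = symbol.upper()
--     # Common crypto patterns
--     crypto_patterns = [
--         'USDT', 'BTC', 'ETH', 'BNB', 'ADA', 'SOL', 'DOT', 'AVAX',
--         'MATIC', 'LINK', 'UNI', 'AAVE', 'SUSHI', 'COMP', 'MKR',
--         'YFI', 'BAL', 'CRV', 'XRP', 'LTC', 'BCH', 'ETC', 'DOGE',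
--         'SHIB', 'CAKE', 'SXP', 'ALICE'
--     ]
--
--     # Check if symbol ends with common quote currencies or contains crypto patterns
--     for pattern in crypto_patterns:
--         if pattern in symbol:
--             return True
--
--     return False
-- ===== SOURCE B (Python) =====
-- CRYPTO_PATTERNS = (
--     'USDT', 'BTC', 'ETH', 'BNB', 'ADA', 'SOL', 'DOT', 'AVAX',
--     'MATIC', 'LINK', 'UNI', 'AAVE', 'SUSHI', 'COMP', 'MKR',
--     'YFI', 'BAL', 'CRV', 'XRP', 'LTC', 'BCH', 'ETC', 'DOGE',
--     'SHIB', 'CAKE', 'SXP', 'ALICE'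
-- )
--
--
-- def is_crypto_symbol(symbol: str) -> bool:
--     """Single left-to-right scan: at each position, does some pattern start here?"""
--     symbol = symbol.upper()
--     return any(symbol.startswith(CRYPTO_PATTERNS, i) for i in range(len(symbol)))
-- ===== Notes on version B (the rewrite author's own statement) =====
-- stated objective: alternative
-- what changed: Replaces A's pattern-outer loop (one substring scan per pattern, early return) by a single left-to-right scan over string positions that checks at each position whether any pattern starts there (str.startswith with a tuple).
import Mathlib
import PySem

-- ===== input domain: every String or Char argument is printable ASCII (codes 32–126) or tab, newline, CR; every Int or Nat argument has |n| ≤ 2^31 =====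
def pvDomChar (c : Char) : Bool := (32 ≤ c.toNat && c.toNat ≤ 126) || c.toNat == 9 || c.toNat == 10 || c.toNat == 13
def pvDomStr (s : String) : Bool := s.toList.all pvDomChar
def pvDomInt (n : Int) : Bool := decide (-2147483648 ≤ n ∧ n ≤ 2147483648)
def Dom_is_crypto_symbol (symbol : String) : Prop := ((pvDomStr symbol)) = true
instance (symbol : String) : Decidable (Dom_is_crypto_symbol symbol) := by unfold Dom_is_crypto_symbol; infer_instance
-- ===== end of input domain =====

-- B replaces A's pattern-outer loop (27 independent substring scans) by a single
-- left-to-right scan over positions, checking at each position whether some pattern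
-- starts there (objective: alternative; same asymptotic cost).

-- the shared literal pattern list (identical in Source A and Source B)
def cryptoPatterns : List String :=
  ["USDT", "BTC", "ETH", "BNB", "ADA", "SOL", "DOT", "AVAX",
   "MATIC", "LINK", "UNI", "AAVE", "SUSHI", "COMP", "MKR",
   "YFI", "BAL", "CRV", "XRP", "LTC", "BCH", "ETC", "DOGE",
   "SHIB", "CAKE", "SXP", "ALICE"]

-- ===== PORT A =====
-- A's for-loop with early return: recurse over the pattern list, 'pattern in symbol' test each
def cryptoLoopA : List String → String → Bool
  | [], _ => false
  | p :: rest, s => if PySem.Str.isIn p s then true else cryptoLoopA rest s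

def is_crypto_symbol (symbol : String) : Bool :=
  cryptoLoopA cryptoPatterns (PySem.Str.upper symbol)

-- ===== PORT B =====
-- Source B: any(symbol.startswith(CRYPTO_PATTERNS, i) for i in range(len(symbol)))
-- symbol.startswith(pats, i) = some pattern is a prefix of symbol[i:]
def is_crypto_symbol_alt (symbol : String) : Bool :=
  let u := (PySem.Str.upper symbol).toList
  (PySem.List.pyRange 0 (u.length : Int) 1).any
    (fun i => cryptoPatterns.any (fun p => PySem.Chars.startswith (u.drop i.toNat) p.toList))

-- ===== PRECONDITION & SPEC =====
def Spec_is_crypto_symbol (symbol : String) (out : Bool) : Prop := out = is_crypto_symbol_alt symbol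
instance (symbol : String) (out : Bool) : Decidable (Spec_is_crypto_symbol symbol out) := by unfold Spec_is_crypto_symbol; infer_instance

-- ===== CLAIM (what is proved, stated in full; the proofs are below) =====
def Claim_equal_is_crypto_symbol : Prop := ∀ (symbol : String), Dom_is_crypto_symbol symbol → Spec_is_crypto_symbol symbol (is_crypto_symbol symbol)

-- ===== LEMMAS AND PROOFS =====

-- A's early-return loop is 'some pattern occurs as a substring of s'
theorem cryptoLoopA_iff (l : List String) (s : String) :
    cryptoLoopA l s = true ↔ ∃ p ∈ l, p.toList <:+: s.toList := by
  induction l with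
  | nil => simp [cryptoLoopA]
  | cons p rest ih =>
    simp only [cryptoLoopA, List.mem_cons]
    split_ifs with h
    · exact iff_of_true rfl ⟨p, Or.inl rfl, (PySem.Str.isIn_iff_infix p s).mp h⟩
    · rw [ih]
      constructor
      · rintro ⟨q, hq, hin⟩
        exact ⟨q, Or.inr hq, hin⟩
      · rintro ⟨q, hq | hq, hin⟩
        · exact absurd ((PySem.Str.isIn_iff_infix q s).mpr hin) (hq ▸ h)
        · exact ⟨q, hq, hin⟩

-- every pattern is a nonempty string
theorem cryptoPatterns_ne_nil : ∀ p ∈ cryptoPatterns, p.toList ≠ [] := by decide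

theorem is_crypto_symbol_eq (symbol : String) :
    is_crypto_symbol symbol = is_crypto_symbol_alt symbol := by
  unfold is_crypto_symbol is_crypto_symbol_alt
  set u := (PySem.Str.upper symbol).toList with hu
  rw [Bool.eq_iff_iff, cryptoLoopA_iff]
  simp only [List.any_eq_true, PySem.List.mem_pyRange_one, ← hu]
  constructor
  · rintro ⟨p, hp, hinf⟩
    obtain ⟨j, hpre⟩ := (PySem.Chars.exists_prefix_drop_iff_isIn p.toList u).mpr
      ((PySem.Chars.isIn_iff_infix p.toList u).mpr hinf)
    have hj : j < u.length := by
      by_contra hge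
      have hnil : List.drop j u = [] := List.drop_eq_nil_of_le (by omega)
      rw [hnil, List.prefix_nil] at hpre
      exact cryptoPatterns_ne_nil p hp hpre
    refine ⟨(j : Int), ⟨by omega, by exact_mod_cast hj⟩, p, hp, ?_⟩
    exact (PySem.Chars.startswith_iff _ _).mpr (by simpa using hpre)
  · rintro ⟨i, ⟨hi0, hilt⟩, p, hp, hsw⟩
    have hpre := (PySem.Chars.startswith_iff _ _).mp hsw
    have hin : PySem.Chars.isIn p.toList u = true :=
      (PySem.Chars.exists_prefix_drop_iff_isIn p.toList u).mp ⟨i.toNat, hpre⟩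
    exact ⟨p, hp, (PySem.Chars.isIn_iff_infix p.toList u).mp hin⟩

-- ===== VERDICT (by name: the statement is the Claim_ definition above) =====
theorem is_crypto_symbol_spec : Claim_equal_is_crypto_symbol := by
  intro symbol _
  exact is_crypto_symbol_eq symbol
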